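-- pv_equiv track=rewrite | github.com/SK0LX/test_by_to4ka2 | run2.py | find_target_gateway
-- ===== SOURCE A (Python) =====
-- from collections import deque
--
-- def find_target_gateway(graph, virus_pos, targets):
--     if not targets:
--         return None
--     visited = set([virus_pos])
--     queue = deque([(virus_pos, 0)])
--     best_gateway = None
--     best_distance = float('inf')
--     while queue:
--         current, distance = queue.popleft()
--
--         for neighbor in sorted(graph.get(current, [])):
--             if neighbor in visited:
--                 continue
--             if neighbor in targets:
--                 if distance + 1 < best_distance or (distance + 1 == best_distance and neighbor < best_gateway):
--                     best_gateway = neighbor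
--                     best_distance = distance + 1
--             else:
--                 visited.add(neighbor)
--                 queue.append((neighbor, distance + 1))
--
--     return best_gateway
-- ===== SOURCE B (Python) =====
-- def find_target_gateway(graph, virus_pos, targets):
--     # Level-synchronous BFS: expand one whole frontier at a time; gateways seen
--     # from the current frontier all lie at the same (minimal) distance, so the
--     # first level that sights any gateway yields the answer as min of that level.
--     if not targets:
--         return None
--     target_set = set(targets)
--     visited = {virus_pos}
--     frontier = [virus_pos]
--     while frontier:
--         found = set()
--         nxt = []
--         for node in frontier:
--             for nb in sorted(graph.get(node, [])):
--                 if nb in visited: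
--                     continue
--                 if nb in target_set:
--                     found.add(nb)
--                 else:
--                     visited.add(nb)
--                     nxt.append(nb)
--         if found:
--             return min(found)
--         frontier = nxt
--     return None
-- ===== Notes on version B (the rewrite author's own statement) =====
-- stated objective: alternative
-- what changed: Replaces A's deque-based BFS carrying (node, distance) pairs with inline best_gateway/best_distance tracking by a level-synchronous BFS over whole frontiers that stops at the first level sighting any gateway and returns the minimum of that level's sightings.
import Mathlib
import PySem

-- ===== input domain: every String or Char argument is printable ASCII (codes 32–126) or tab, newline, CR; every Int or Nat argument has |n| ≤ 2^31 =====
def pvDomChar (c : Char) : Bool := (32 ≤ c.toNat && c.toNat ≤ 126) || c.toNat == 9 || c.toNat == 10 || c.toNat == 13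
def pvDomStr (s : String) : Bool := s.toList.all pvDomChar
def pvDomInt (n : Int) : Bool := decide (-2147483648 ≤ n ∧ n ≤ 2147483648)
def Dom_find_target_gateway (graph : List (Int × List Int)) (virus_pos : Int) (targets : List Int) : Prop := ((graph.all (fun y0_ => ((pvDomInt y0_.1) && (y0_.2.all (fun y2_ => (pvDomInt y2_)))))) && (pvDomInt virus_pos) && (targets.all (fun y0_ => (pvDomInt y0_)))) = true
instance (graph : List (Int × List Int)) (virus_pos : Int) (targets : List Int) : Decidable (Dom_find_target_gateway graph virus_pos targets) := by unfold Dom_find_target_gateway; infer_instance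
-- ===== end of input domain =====

-- B replaces A's deque-based BFS carrying (node, distance) pairs with inline
-- best-gateway/best-distance tracking by a level-synchronous BFS: it returns the min of the
-- first frontier level that sights a gateway (objective: alternative decomposition — no
-- distance bookkeeping, early exit).  Both loop ports are fuel-guarded structural recursions;
-- the fuel is a bound on the loop's iteration count (proved sufficient by the lemmas below),
-- so each port computes exactly what its Python loop computes.

-- ===== PORT A =====
-- graph.get(current, [])
def pvLookup (graph : List (Int × List Int)) (c : Int) : List Int :=
  ((PySem.Dict.mk graph).get? c).getD []

-- all values that can ever be added to `visited` beyond the start node (fuel bound only)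
def pvUniv (graph : List (Int × List Int)) : List Int :=
  PySem.Set.ofList (graph.flatMap (·.2))

def pvUnvis (graph : List (Int × List Int)) (V : PySem.Set Int) : Nat :=
  ((pvUniv graph).toFinset \ V.toFinset).card

-- body of A's inner `for neighbor in sorted(...)` loop; state = (visited, queue, best_gateway, best_distance)
-- (Python's float('inf') / None sentinels are encoded as `none`: initially both are None/inf and
--  Python's short-circuit `or` never compares against them, so the match below is exact)
def pvInnerA (targets : List Int) (dist : Int)
    (st : PySem.Set Int × List (Int × Int) × Option Int × Option Int) (nb : Int) :
    PySem.Set Int × List (Int × Int) × Option Int × Option Int :=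
  if st.1.contains nb then st
  else if targets.contains nb then
    let better : Bool := match st.2.2.1, st.2.2.2 with
      | some g, some D => decide (dist + 1 < D) || (decide (dist + 1 = D) && decide (nb < g))
      | _, _ => true
    if better then (st.1, st.2.1, some nb, some (dist + 1)) else st
  else (PySem.Set.add st.1 nb, st.2.1 ++ [(nb, dist + 1)], st.2.2.1, st.2.2.2)

-- A's `while queue` loop (fuel ≥ 3·|unvisited universe| + |queue| never runs out)
def pvLoopA (graph : List (Int × List Int)) (targets : List Int) :
    Nat → List (Int × Int) → PySem.Set Int → Option Int → Option Int → Option Int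
  | _, [], _, bG, _ => bG
  | 0, _ :: _, _, bG, _ => bG
  | fuel + 1, (c, dist) :: rest, V, bG, bD =>
    let st := (PySem.List.sorted (pvLookup graph c) (fun y => y) false).foldl
      (pvInnerA targets dist) (V, rest, bG, bD)
    pvLoopA graph targets fuel st.2.1 st.1 st.2.2.1 st.2.2.2

def find_target_gateway (graph : List (Int × List Int)) (virus_pos : Int) (targets : List Int) : Option Int :=
  match targets with
  | [] => none
  | _ :: _ =>
    pvLoopA graph targets (3 * pvUnvis graph (PySem.Set.ofList [virus_pos]) + 1)
      [(virus_pos, 0)] (PySem.Set.ofList [virus_pos]) none none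

-- ===== PORT B =====
-- body of B's inner `for nb in sorted(...)` loop; state = (visited, nxt, found)
def pvInnerB (tset : List Int)
    (st : PySem.Set Int × List Int × PySem.Set Int) (nb : Int) :
    PySem.Set Int × List Int × PySem.Set Int :=
  if st.1.contains nb then st
  else if PySem.Set.contains tset nb then (st.1, st.2.1, PySem.Set.add st.2.2 nb)
  else (PySem.Set.add st.1 nb, st.2.1 ++ [nb], st.2.2)

-- body of B's `for node in frontier` loop
def pvNodeB (graph : List (Int × List Int)) (tset : List Int)
    (st : PySem.Set Int × List Int × PySem.Set Int) (node : Int) :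
    PySem.Set Int × List Int × PySem.Set Int :=
  (PySem.List.sorted (pvLookup graph node) (fun y => y) false).foldl (pvInnerB tset) st

-- B's `while frontier` loop (same fuel bound)
def pvLoopB (graph : List (Int × List Int)) (tset : List Int) :
    Nat → List Int → PySem.Set Int → Option Int
  | _, [], _ => none
  | 0, _ :: _, _ => none
  | fuel + 1, f :: fs, V =>
    let st := (f :: fs).foldl (pvNodeB graph tset) (V, [], [])
    if st.2.2.isEmpty then pvLoopB graph tset fuel st.2.1 st.1
    else PySem.List.min? st.2.2 (fun y => y)

def find_target_gateway_alt (graph : List (Int × List Int)) (virus_pos : Int) (targets : List Int) : Option Int :=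
  match targets with
  | [] => none
  | _ :: _ =>
    pvLoopB graph (PySem.Set.ofList targets) (3 * pvUnvis graph (PySem.Set.ofList [virus_pos]) + 1)
      [virus_pos] (PySem.Set.ofList [virus_pos])

-- ===== PRECONDITION & SPEC =====
def Spec_find_target_gateway (graph : List (Int × List Int)) (virus_pos : Int) (targets : List Int) (out : Option Int) : Prop := out = find_target_gateway_alt graph virus_pos targets
instance (graph : List (Int × List Int)) (virus_pos : Int) (targets : List Int) (out : Option Int) : Decidable (Spec_find_target_gateway graph virus_pos targets out) := by unfold Spec_find_target_gateway; infer_instance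

-- ===== CLAIM (what is proved, stated in full; the proofs are below) =====
def Claim_equal_find_target_gateway : Prop := ∀ (graph : List (Int × List Int)) (virus_pos : Int) (targets : List Int), Dom_find_target_gateway graph virus_pos targets → Spec_find_target_gateway graph virus_pos targets (find_target_gateway graph virus_pos targets)

-- ===== LEMMAS AND PROOFS =====

lemma pvUnvis_add (graph : List (Int × List Int)) (V : PySem.Set Int) (nb : Int)
    (h1 : nb ∈ pvUniv graph) (h2 : ¬ nb ∈ V) :
    pvUnvis graph (PySem.Set.add V nb) + 1 = pvUnvis graph V := by
  unfold pvUnvis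
  rw [PySem.Set.add_of_not_mem h2]
  have hins : (V ++ [nb]).toFinset = insert nb V.toFinset := by
    simp [List.toFinset_append]
  rw [hins, Finset.sdiff_insert, Finset.card_erase_of_mem]
  · have hpos : 0 < ((pvUniv graph).toFinset \ V.toFinset).card := by
      apply Finset.card_pos.mpr
      exact ⟨nb, Finset.mem_sdiff.mpr ⟨List.mem_toFinset.mpr h1, by simpa using h2⟩⟩
    omega
  · exact Finset.mem_sdiff.mpr ⟨List.mem_toFinset.mpr h1, by simpa using h2⟩

lemma pvGet_sub (graph : List (Int × List Int)) (c : Int) :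
    ∀ (l : List Int), (PySem.Dict.mk graph).get? c = some l → ∀ x ∈ l, x ∈ graph.flatMap (·.2) := by
  induction graph with
  | nil => intro l h; simp [PySem.Dict.get?] at h
  | cons p rest ih =>
    intro l h x hx
    obtain ⟨k, v⟩ := p
    rw [PySem.Dict.get?_mk_cons] at h
    by_cases hk : (k == c) = true
    · rw [if_pos hk] at h
      have hv : v = l := Option.some.inj h
      subst hv
      exact List.mem_flatMap.mpr ⟨(k, v), List.mem_cons_self, hx⟩
    · rw [if_neg hk] at h
      have := ih l h x hx
      simp only [List.flatMap_cons]
      exact List.mem_append_right _ this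

lemma pvLookup_sub (graph : List (Int × List Int)) (c : Int) :
    ∀ x ∈ PySem.List.sorted (pvLookup graph c) (fun y => y) false, x ∈ pvUniv graph := by
  intro x hx
  have hx' : x ∈ pvLookup graph c :=
    (PySem.List.sorted_perm (pvLookup graph c) (fun y => y) false).mem_iff.mp hx
  unfold pvLookup at hx'
  cases hg : (PySem.Dict.mk graph).get? c with
  | none => rw [hg] at hx'; simp at hx'
  | some l =>
    rw [hg] at hx'
    simp only [Option.getD_some] at hx'
    exact (PySem.Set.mem_ofList _ _).mpr (pvGet_sub graph c l hg x hx')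

lemma pvInnerB_meas (graph : List (Int × List Int)) (tset : List Int) :
    ∀ (nbs : List Int) (st : PySem.Set Int × List Int × PySem.Set Int),
      (∀ x ∈ nbs, x ∈ pvUniv graph) →
      3 * pvUnvis graph (nbs.foldl (pvInnerB tset) st).1
          + 2 * (nbs.foldl (pvInnerB tset) st).2.1.length
        ≤ 3 * pvUnvis graph st.1 + 2 * st.2.1.length := by
  intro nbs
  induction nbs with
  | nil => intro st _; simp
  | cons a l ih =>
    intro st hmem
    simp only [List.foldl_cons]
    refine le_trans (ih _ (fun x hx => hmem x (List.mem_cons_of_mem _ hx))) ?_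
    obtain ⟨V, nxt, found⟩ := st
    by_cases hc : a ∈ V
    · simp [pvInnerB, hc]
    · by_cases ht : a ∈ tset
      · simp [pvInnerB, hc, ht]
      · have hu := pvUnvis_add graph V a (hmem a List.mem_cons_self) hc
        rw [PySem.Set.add_of_not_mem hc] at hu
        simp [pvInnerB, hc, ht]
        omega

lemma pvNodeB_meas (graph : List (Int × List Int)) (tset : List Int)
    (st : PySem.Set Int × List Int × PySem.Set Int) (node : Int) :
    3 * pvUnvis graph (pvNodeB graph tset st node).1 + 2 * (pvNodeB graph tset st node).2.1.length
      ≤ 3 * pvUnvis graph st.1 + 2 * st.2.1.length :=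
  pvInnerB_meas graph tset _ st (pvLookup_sub graph node)

-- A's (best_gateway, best_distance) pair as a function of B's `found` set for the current level
def pvEncode (found : List Int) (d : Int) : Option Int × Option Int :=
  match PySem.List.min? found (fun y => y) with
  | none => (none, none)
  | some m => (some m, some (d + 1))

lemma pvMin_add (found : List Int) (nb m : Int)
    (h : PySem.List.min? found (fun y => y) = some m) :
    PySem.List.min? (PySem.Set.add found nb) (fun y => y) = some (min m nb) := by
  by_cases hm : nb ∈ found
  · rw [PySem.Set.add_of_mem hm, h]
    have hle : m ≤ nb := PySem.List.min?_isMin h nb hm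
    rw [min_eq_left hle]
  · rw [PySem.Set.add_of_not_mem hm]
    cases found with
    | nil => cases h
    | cons f ft =>
      rw [PySem.List.min?_id_cons] at h
      rw [List.cons_append, PySem.List.min?_id_cons, List.foldl_append]
      simp only [List.foldl_cons, List.foldl_nil]
      cases h
      rfl

-- once best is set and every queued distance is ≥ best_distance, A's answer never changes
lemma pvInnerA_keep (targets : List Int) (dist D g : Int) (hD : D ≤ dist) :
    ∀ (nbs : List Int) (V : PySem.Set Int) (q : List (Int × Int)),
      (∀ p ∈ q, D ≤ p.2) →
      (nbs.foldl (pvInnerA targets dist) (V, q, some g, some D)).2.2.1 = some g ∧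
      (nbs.foldl (pvInnerA targets dist) (V, q, some g, some D)).2.2.2 = some D ∧
      ∀ p ∈ (nbs.foldl (pvInnerA targets dist) (V, q, some g, some D)).2.1, D ≤ p.2 := by
  intro nbs
  induction nbs with
  | nil => intro V q hq; exact ⟨rfl, rfl, hq⟩
  | cons a l ih =>
    intro V q hq
    simp only [List.foldl_cons]
    have hstep : pvInnerA targets dist (V, q, some g, some D) a = (V, q, some g, some D) ∨
        pvInnerA targets dist (V, q, some g, some D) a
          = (PySem.Set.add V a, q ++ [(a, dist + 1)], some g, some D) := by
      by_cases hc : a ∈ V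
      · left; simp [pvInnerA, hc]
      · by_cases ht : a ∈ targets
        · left
          have h1 : ¬ (dist + 1 < D) := by omega
          have h2 : ¬ (dist + 1 = D) := by omega
          simp [pvInnerA, hc, ht, h1, h2]
        · right; simp [pvInnerA, hc, ht]
    rcases hstep with hs | hs
    · rw [hs]; exact ih V q hq
    · rw [hs]
      refine ih _ _ ?_
      intro p hp
      rcases List.mem_append.mp hp with hp | hp
      · exact hq p hp
      · simp only [List.mem_cons, List.not_mem_nil, or_false] at hp
        rw [hp]
        dsimp only
        omega

lemma pvFrozen (graph : List (Int × List Int)) (targets : List Int) :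
    ∀ (fuel : Nat) (q : List (Int × Int)) (V : PySem.Set Int) (g D : Int),
      (∀ p ∈ q, D ≤ p.2) →
      pvLoopA graph targets fuel q V (some g) (some D) = some g := by
  intro fuel
  induction fuel with
  | zero =>
    intro q V g D _
    cases q with
    | nil => rw [pvLoopA]
    | cons p rest => rw [pvLoopA]
  | succ f ih =>
    intro q V g D hq
    cases q with
    | nil => rw [pvLoopA]
    | cons p rest =>
      obtain ⟨c, dist⟩ := p
      have hd : D ≤ dist := hq (c, dist) List.mem_cons_self
      have hkeep := pvInnerA_keep targets dist D g hd
        (PySem.List.sorted (pvLookup graph c) (fun y => y) false) V rest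
        (fun p hp => hq p (List.mem_cons_of_mem _ hp))
      rw [pvLoopA]
      rw [hkeep.1, hkeep.2.1]
      exact ih _ _ g D hkeep.2.2

-- lockstep relation between A's inner step and B's inner step on a related state
lemma pvStep_rel (targets tset : List Int) (d : Int)
    (hts : ∀ x : Int, x ∈ tset ↔ x ∈ targets)
    (V : PySem.Set Int) (q0 : List (Int × Int)) (nxt found : List Int) (a : Int) :
    pvInnerA targets d
      (V, q0 ++ nxt.map (fun x => (x, d + 1)), (pvEncode found d).1, (pvEncode found d).2) a
    = ((pvInnerB tset (V, nxt, found) a).1,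
       q0 ++ (pvInnerB tset (V, nxt, found) a).2.1.map (fun x => (x, d + 1)),
       (pvEncode (pvInnerB tset (V, nxt, found) a).2.2 d).1,
       (pvEncode (pvInnerB tset (V, nxt, found) a).2.2 d).2) := by
  by_cases hc : a ∈ V
  · simp [pvInnerA, pvInnerB, hc]
  · by_cases ht : a ∈ targets
    · have ht' : a ∈ tset := (hts a).mpr ht
      cases hm : PySem.List.min? found (fun y => y) with
      | none =>
        have hfe : found = [] := (PySem.List.min?_eq_none_iff _ _).mp hm
        subst hfe
        have hmin : PySem.List.min? [a] (fun y : Int => y) = some a := rfl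
        simp [pvInnerA, pvInnerB, hc, ht, ht', pvEncode, hm, hmin]
      | some m =>
        have hadd := pvMin_add found a m hm
        by_cases hlt : a < m
        · have hmm : min m a = a := min_eq_right (le_of_lt hlt)
          simp [pvInnerA, pvInnerB, hc, ht, ht', pvEncode, hm, hadd, hlt, hmm]
        · have hmm : min m a = m := min_eq_left (le_of_not_gt hlt)
          simp [pvInnerA, pvInnerB, hc, ht, ht', pvEncode, hm, hadd, hlt, hmm]
    · have ht' : ¬ a ∈ tset := fun hmem => ht ((hts a).mp hmem)
      simp [pvInnerA, pvInnerB, hc, ht, ht', List.map_append]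

lemma pvInner_rel (targets tset : List Int) (d : Int)
    (hts : ∀ x : Int, x ∈ tset ↔ x ∈ targets) :
    ∀ (nbs : List Int) (V : PySem.Set Int) (q0 : List (Int × Int)) (nxt found : List Int),
      nbs.foldl (pvInnerA targets d)
        (V, q0 ++ nxt.map (fun x => (x, d + 1)), (pvEncode found d).1, (pvEncode found d).2)
      = ((nbs.foldl (pvInnerB tset) (V, nxt, found)).1,
         q0 ++ (nbs.foldl (pvInnerB tset) (V, nxt, found)).2.1.map (fun x => (x, d + 1)),
         (pvEncode (nbs.foldl (pvInnerB tset) (V, nxt, found)).2.2 d).1,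
         (pvEncode (nbs.foldl (pvInnerB tset) (V, nxt, found)).2.2 d).2) := by
  intro nbs
  induction nbs with
  | nil => intro V q0 nxt found; rfl
  | cons a l ih =>
    intro V q0 nxt found
    simp only [List.foldl_cons]
    rw [pvStep_rel targets tset d hts V q0 nxt found a]
    have h := ih (pvInnerB tset (V, nxt, found) a).1 q0
      (pvInnerB tset (V, nxt, found) a).2.1 (pvInnerB tset (V, nxt, found) a).2.2
    simpa using h

-- main level-decomposition invariant: A's mixed-distance queue vs B's mid-level state
lemma pvMain_rel (graph : List (Int × List Int)) (targets tset : List Int)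
    (hts : ∀ x : Int, x ∈ tset ↔ x ∈ targets) :
    ∀ (n : Nat) (rem nxt : List Int) (V : PySem.Set Int) (found : List Int) (d : Int)
      (fuelA fuelB : Nat),
      n = 3 * pvUnvis graph V + 2 * nxt.length + rem.length →
      n ≤ fuelA →
      3 * pvUnvis graph V + 2 * nxt.length ≤ fuelB →
      pvLoopA graph targets fuelA
        (rem.map (fun x => (x, d)) ++ nxt.map (fun x => (x, d + 1))) V
        (pvEncode found d).1 (pvEncode found d).2
      = (if (rem.foldl (pvNodeB graph tset) (V, nxt, found)).2.2.isEmpty then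
           pvLoopB graph tset fuelB (rem.foldl (pvNodeB graph tset) (V, nxt, found)).2.1
             (rem.foldl (pvNodeB graph tset) (V, nxt, found)).1
         else
           PySem.List.min? (rem.foldl (pvNodeB graph tset) (V, nxt, found)).2.2 (fun y => y)) := by
  intro n
  induction n using Nat.strong_induction_on with
  | _ n ih =>
    intro rem nxt V found d fuelA fuelB hn hfA hfB
    cases rem with
    | nil =>
      simp only [List.map_nil, List.nil_append, List.foldl_nil]
      cases hm : PySem.List.min? found (fun y => y) with
      | none =>
        have hfe : found = [] := (PySem.List.min?_eq_none_iff _ _).mp hm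
        subst hfe
        rw [show pvEncode [] d = ((none : Option Int), (none : Option Int)) from rfl]
        simp only [List.isEmpty_nil, if_true]
        cases nxt with
        | nil =>
          simp only [List.map_nil]
          rw [pvLoopA, pvLoopB]
        | cons m ms =>
          have hfB1 : 0 < fuelB := by
            simp only [List.length_cons] at hfB
            omega
          cases fuelB with
          | zero => omega
          | succ fB =>
            have hlt : 3 * pvUnvis graph V + 2 * ([] : List Int).length + (m :: ms).length < n := by
              simp only [List.length_cons, List.length_nil] at hn ⊢
              omega
            have h := ih _ hlt (m :: ms) [] V [] (d + 1) fuelA fB rfl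
              (by simp only [List.length_cons, List.length_nil] at hn ⊢; omega)
              (by simp only [List.length_cons, List.length_nil] at hfB ⊢; omega)
            simp only [List.map_nil, List.append_nil] at h
            rw [show pvEncode [] (d + 1) = ((none : Option Int), (none : Option Int)) from rfl] at h
            rw [h]
            try rw [pvLoopB]
      | some mval =>
        have hne : found.isEmpty = false := by
          cases found with
          | nil => cases hm
          | cons f ft => rfl
        simp only [pvEncode, hm]
        rw [pvFrozen graph targets fuelA (nxt.map (fun x => (x, d + 1))) V mval (d + 1) ?_]
        · simp [hne]
        · intro p hp
          obtain ⟨x, _, rfl⟩ := List.mem_map.mp hp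
          exact le_refl _
    | cons c rem' =>
      have hfA1 : 0 < fuelA := by
        simp only [List.length_cons] at hn
        omega
      cases fuelA with
      | zero => omega
      | succ fA =>
        have hq : ((c :: rem').map (fun x => (x, d)) ++ nxt.map (fun x => (x, d + 1)))
            = (c, d) :: (rem'.map (fun x => (x, d)) ++ nxt.map (fun x => (x, d + 1))) := rfl
        rw [hq, pvLoopA]
        rw [pvInner_rel targets tset d hts _ V (rem'.map (fun x => (x, d))) nxt found]
        have hmeas := pvNodeB_meas graph tset (V, nxt, found) c
        dsimp only at hmeas
        have hlt : 3 * pvUnvis graph (pvNodeB graph tset (V, nxt, found) c).1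
            + 2 * (pvNodeB graph tset (V, nxt, found) c).2.1.length + rem'.length < n := by
          simp only [List.length_cons] at hn
          omega
        have h := ih _ hlt rem' (pvNodeB graph tset (V, nxt, found) c).2.1
          (pvNodeB graph tset (V, nxt, found) c).1 (pvNodeB graph tset (V, nxt, found) c).2.2 d
          fA fuelB rfl
          (by simp only [List.length_cons] at hn; omega)
          (by omega)
        simp only [List.foldl_cons]
        exact h

-- ===== VERDICT (by name: the statement is the Claim_ definition above) =====
theorem find_target_gateway_spec : Claim_equal_find_target_gateway := by
  intro graph virus_pos targets _
  unfold Spec_find_target_gateway find_target_gateway find_target_gateway_alt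
  cases targets with
  | nil => rfl
  | cons t ts =>
    show pvLoopA graph (t :: ts) (3 * pvUnvis graph (PySem.Set.ofList [virus_pos]) + 1)
        [(virus_pos, 0)] (PySem.Set.ofList [virus_pos]) none none
      = pvLoopB graph (PySem.Set.ofList (t :: ts))
          (3 * pvUnvis graph (PySem.Set.ofList [virus_pos]) + 1)
          [virus_pos] (PySem.Set.ofList [virus_pos])
    have hts : ∀ x : Int, x ∈ PySem.Set.ofList (t :: ts) ↔ x ∈ (t :: ts) :=
      fun x => PySem.Set.mem_ofList _ _
    have h := pvMain_rel graph (t :: ts) (PySem.Set.ofList (t :: ts)) hts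
      (3 * pvUnvis graph (PySem.Set.ofList [virus_pos]) + 2 * ([] : List Int).length
        + [virus_pos].length)
      [virus_pos] [] (PySem.Set.ofList [virus_pos]) [] 0
      (3 * pvUnvis graph (PySem.Set.ofList [virus_pos]) + 1)
      (3 * pvUnvis graph (PySem.Set.ofList [virus_pos]))
      rfl
      (by simp only [List.length_cons, List.length_nil]; omega)
      (by simp only [List.length_nil]; omega)
    simp only [List.map_cons, List.map_nil, List.append_nil] at h
    rw [show pvEncode [] 0 = ((none : Option Int), (none : Option Int)) from rfl] at h
    rw [h]
    try rw [pvLoopB]
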